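-- pv_equiv track=rewrite | github.com/Lecrut/Diffusion-code-generation | data/code/39_9_2.py | find_nested_substrings
-- ===== SOURCE A (Python) =====
-- def find_nested_substrings(phrase):
--     n = len(phrase)
--     nested_substrings = set()
--     for i in range(n):
--         for j in range(i + 1, n):
--             substring = phrase[i:j+1]
--             for k in range(len(substring)):
--                 for l in range(k + 1, len(substring)):
--                     nested = substring[k:l+1]
--                     if len(nested) > 0:
--                         nested_substrings.add(nested)
--     result = sorted(list(nested_substrings))
--     return result
-- ===== SOURCE B (Python) =====
-- def find_nested_substrings(phrase):
--     # Directly collect every substring of length >= 2 (one double loop), then sort.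
--     n = len(phrase)
--     subs = set()
--     for i in range(n):
--         for j in range(i + 2, n + 1):
--             subs.add(phrase[i:j])
--     return sorted(subs)
-- ===== Notes on version B (the rewrite author's own statement) =====
-- stated objective: faster
-- what changed: A enumerates all substrings and then all substrings of each substring (4 nested loops plus slicing, collecting the same strings many times); B observes that the nested substrings of length->=2 substrings are exactly the substrings of length >= 2 and collects each once with a single double loop.
import Mathlib
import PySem

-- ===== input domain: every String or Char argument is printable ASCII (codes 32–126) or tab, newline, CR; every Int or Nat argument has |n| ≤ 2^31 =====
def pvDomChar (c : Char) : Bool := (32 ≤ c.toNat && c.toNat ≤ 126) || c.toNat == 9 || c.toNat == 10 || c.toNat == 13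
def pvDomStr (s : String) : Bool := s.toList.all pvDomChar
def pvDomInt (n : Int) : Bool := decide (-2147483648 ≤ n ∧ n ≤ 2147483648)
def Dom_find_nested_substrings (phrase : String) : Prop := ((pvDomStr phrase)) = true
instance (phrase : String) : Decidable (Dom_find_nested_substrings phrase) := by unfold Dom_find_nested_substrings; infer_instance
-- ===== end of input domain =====

-- B replaces A's quadruple substring-of-substring enumeration by a single double loop
-- over (start, end) collecting every substring of length ≥ 2 once (faster: asymptotic).

-- ===== PORT A =====
def find_nested_substrings (phrase : String) : List String :=
  let n : Int := PySem.Str.len phrase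
  let nested_substrings : PySem.Set String :=
    (PySem.List.pyRange 0 n 1).foldl (fun acc i =>
      (PySem.List.pyRange (i + 1) n 1).foldl (fun acc j =>
        let substring := PySem.Str.slice phrase (some i) (some (j + 1))
        (PySem.List.pyRange 0 (PySem.Str.len substring) 1).foldl (fun acc k =>
          (PySem.List.pyRange (k + 1) (PySem.Str.len substring) 1).foldl (fun acc l =>
            let nested := PySem.Str.slice substring (some k) (some (l + 1))
            if PySem.Str.len nested > 0 then PySem.Set.add acc nested else acc)
          acc) acc) acc) PySem.Set.empty
  PySem.List.sorted nested_substrings (fun x => x) false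

-- ===== PORT B =====
def find_nested_substrings_alt (phrase : String) : List String :=
  let n : Int := PySem.Str.len phrase
  let subs : PySem.Set String :=
    (PySem.List.pyRange 0 n 1).foldl (fun acc i =>
      (PySem.List.pyRange (i + 2) (n + 1) 1).foldl (fun acc j =>
        PySem.Set.add acc (PySem.Str.slice phrase (some i) (some j))) acc) PySem.Set.empty
  PySem.List.sorted subs (fun x => x) false

-- ===== PRECONDITION & SPEC =====
def Spec_find_nested_substrings (phrase : String) (out : List String) : Prop := out = find_nested_substrings_alt phrase
instance (phrase : String) (out : List String) : Decidable (Spec_find_nested_substrings phrase out) := by unfold Spec_find_nested_substrings; infer_instance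

-- ===== CLAIM (what is proved, stated in full; the proofs are below) =====
def Claim_equal_find_nested_substrings : Prop := ∀ (phrase : String), Dom_find_nested_substrings phrase → Spec_find_nested_substrings phrase (find_nested_substrings phrase)

-- ===== LEMMAS AND PROOFS =====

-- membership through a foldl of set-adding steps
theorem pv_mem_foldl_iff {beta : Type} (Q : beta -> String -> Prop) (l : List beta)
    (step : List String -> beta -> List String)
    (hstep : forall s x a, a ∈ step s x ↔ a ∈ s ∨ Q x a) :
    forall (s : List String) (a : String), a ∈ l.foldl step s ↔ a ∈ s ∨ ∃ x ∈ l, Q x a := by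
  induction l with
  | nil => simp
  | cons y t ih =>
    intro s a
    simp only [List.foldl_cons, ih, hstep, List.mem_cons]
    constructor
    · rintro ((h | h) | ⟨x, hx, hq⟩)
      · exact Or.inl h
      · exact Or.inr ⟨y, Or.inl rfl, h⟩
      · exact Or.inr ⟨x, Or.inr hx, hq⟩
    · rintro (h | ⟨x, (rfl | hx), hq⟩)
      · exact Or.inl (Or.inl h)
      · exact Or.inl (Or.inr hq)
      · exact Or.inr ⟨x, hx, hq⟩

theorem pv_nodup_foldl {beta : Type} (l : List beta) (step : List String -> beta -> List String)
    (hstep : forall s x, s.Nodup -> (step s x).Nodup) :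
    forall s : List String, s.Nodup -> (l.foldl step s).Nodup := by
  induction l with
  | nil => intro s h; simpa using h
  | cons y t ih => intro s h; exact ih _ (hstep _ _ h)

-- "a is a substring of phrase of length >= 2" (proof-side characterisation)
def pvSub (phrase a : String) : Prop :=
  ∃ p q : Nat, p + q ≤ phrase.toList.length ∧ 2 ≤ q ∧
    a = String.ofList ((phrase.toList.drop p).take q)

-- a Python slice s[a:b] with nonnegative bounds, as drop/take on the character list
theorem pv_slice_repr (s : String) (a b : Int) (ha : 0 ≤ a) (hb : 0 ≤ b) :
    PySem.Str.slice s (some a) (some b)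
      = String.ofList ((s.toList.drop a.toNat).take (b.toNat - a.toNat)) := by
  simp [PySem.Str.slice, PySem.Chars.slice, PySem.List.slice_toNat _ ha hb]

theorem pv_len_slice (s : String) (a b : Int) (ha : 0 ≤ a) (hb : 0 ≤ b) :
    PySem.Str.len (PySem.Str.slice s (some a) (some b))
      = ((min (b.toNat - a.toNat) (s.toList.length - a.toNat) : Nat) : Int) := by
  rw [pv_slice_repr s a b ha hb, PySem.Str.len_eq, String.toList_ofList,
    List.length_take, List.length_drop]

theorem pv_memA (phrase a : String) :
    a ∈ (let n : Int := PySem.Str.len phrase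
      (PySem.List.pyRange 0 n 1).foldl (fun acc i =>
        (PySem.List.pyRange (i + 1) n 1).foldl (fun acc j =>
          let substring := PySem.Str.slice phrase (some i) (some (j + 1))
          (PySem.List.pyRange 0 (PySem.Str.len substring) 1).foldl (fun acc k =>
            (PySem.List.pyRange (k + 1) (PySem.Str.len substring) 1).foldl (fun acc l =>
              let nested := PySem.Str.slice substring (some k) (some (l + 1))
              if PySem.Str.len nested > 0 then PySem.Set.add acc nested else acc)
            acc) acc) acc) (PySem.Set.empty : PySem.Set String)) ↔ pvSub phrase a := by
  have h4 : forall (sub : String) (k : Int) (s : List String) (a' : String),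
      a' ∈ (PySem.List.pyRange (k + 1) (PySem.Str.len sub) 1).foldl (fun acc l =>
          let nested := PySem.Str.slice sub (some k) (some (l + 1))
          if PySem.Str.len nested > 0 then PySem.Set.add acc nested else acc) s ↔
        a' ∈ s ∨ ∃ l ∈ PySem.List.pyRange (k + 1) (PySem.Str.len sub) 1,
          (PySem.Str.len (PySem.Str.slice sub (some k) (some (l + 1))) > 0 ∧
            a' = PySem.Str.slice sub (some k) (some (l + 1))) := by
    intro sub k
    refine pv_mem_foldl_iff _ _ _ ?_
    intro s x a'
    dsimp only
    by_cases h : PySem.Str.len (PySem.Str.slice sub (some k) (some (x + 1))) > 0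
    · rw [if_pos h, PySem.Set.mem_add]
      exact ⟨fun h' => h'.imp_right (fun e => ⟨h, e⟩), fun h' => h'.imp_right And.right⟩
    · rw [if_neg h]
      exact ⟨fun h' => Or.inl h', fun h' => h'.elim id (fun hc => absurd hc.1 h)⟩
  have h3 : forall (sub : String) (s : List String) (a' : String),
      a' ∈ (PySem.List.pyRange 0 (PySem.Str.len sub) 1).foldl (fun acc k =>
          (PySem.List.pyRange (k + 1) (PySem.Str.len sub) 1).foldl (fun acc l =>
            let nested := PySem.Str.slice sub (some k) (some (l + 1))
            if PySem.Str.len nested > 0 then PySem.Set.add acc nested else acc) acc) s ↔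
        a' ∈ s ∨ ∃ k ∈ PySem.List.pyRange 0 (PySem.Str.len sub) 1,
          ∃ l ∈ PySem.List.pyRange (k + 1) (PySem.Str.len sub) 1,
            (PySem.Str.len (PySem.Str.slice sub (some k) (some (l + 1))) > 0 ∧
              a' = PySem.Str.slice sub (some k) (some (l + 1))) :=
    fun sub s a' => pv_mem_foldl_iff _ _ _ (fun s k a' => h4 sub k s a') s a'
  have h2 : forall (i : Int) (s : List String) (a' : String),
      a' ∈ (PySem.List.pyRange (i + 1) (PySem.Str.len phrase) 1).foldl (fun acc j =>
          let substring := PySem.Str.slice phrase (some i) (some (j + 1))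
          (PySem.List.pyRange 0 (PySem.Str.len substring) 1).foldl (fun acc k =>
            (PySem.List.pyRange (k + 1) (PySem.Str.len substring) 1).foldl (fun acc l =>
              let nested := PySem.Str.slice substring (some k) (some (l + 1))
              if PySem.Str.len nested > 0 then PySem.Set.add acc nested else acc)
            acc) acc) s ↔
        a' ∈ s ∨ ∃ j ∈ PySem.List.pyRange (i + 1) (PySem.Str.len phrase) 1,
          ∃ k ∈ PySem.List.pyRange 0 (PySem.Str.len (PySem.Str.slice phrase (some i) (some (j + 1)))) 1,
          ∃ l ∈ PySem.List.pyRange (k + 1) (PySem.Str.len (PySem.Str.slice phrase (some i) (some (j + 1)))) 1,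
            (PySem.Str.len (PySem.Str.slice (PySem.Str.slice phrase (some i) (some (j + 1))) (some k) (some (l + 1))) > 0 ∧
              a' = PySem.Str.slice (PySem.Str.slice phrase (some i) (some (j + 1))) (some k) (some (l + 1))) :=
    fun i s a' => pv_mem_foldl_iff _ _ _
      (fun s j a' => h3 (PySem.Str.slice phrase (some i) (some (j + 1))) s a') s a'
  have h1 : a ∈ (PySem.List.pyRange 0 (PySem.Str.len phrase) 1).foldl (fun acc i =>
        (PySem.List.pyRange (i + 1) (PySem.Str.len phrase) 1).foldl (fun acc j =>
          let substring := PySem.Str.slice phrase (some i) (some (j + 1))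
          (PySem.List.pyRange 0 (PySem.Str.len substring) 1).foldl (fun acc k =>
            (PySem.List.pyRange (k + 1) (PySem.Str.len substring) 1).foldl (fun acc l =>
              let nested := PySem.Str.slice substring (some k) (some (l + 1))
              if PySem.Str.len nested > 0 then PySem.Set.add acc nested else acc)
            acc) acc) acc) (PySem.Set.empty : PySem.Set String) ↔
      a ∈ (PySem.Set.empty : PySem.Set String) ∨
        ∃ i ∈ PySem.List.pyRange 0 (PySem.Str.len phrase) 1,
        ∃ j ∈ PySem.List.pyRange (i + 1) (PySem.Str.len phrase) 1,
        ∃ k ∈ PySem.List.pyRange 0 (PySem.Str.len (PySem.Str.slice phrase (some i) (some (j + 1)))) 1,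
        ∃ l ∈ PySem.List.pyRange (k + 1) (PySem.Str.len (PySem.Str.slice phrase (some i) (some (j + 1)))) 1,
          (PySem.Str.len (PySem.Str.slice (PySem.Str.slice phrase (some i) (some (j + 1))) (some k) (some (l + 1))) > 0 ∧
            a = PySem.Str.slice (PySem.Str.slice phrase (some i) (some (j + 1))) (some k) (some (l + 1))) :=
    pv_mem_foldl_iff _ _ _ (fun s i a' => h2 i s a') (PySem.Set.empty : PySem.Set String) a
  refine h1.trans ?_
  clear h1 h2 h3 h4
  simp only [PySem.Set.empty, List.not_mem_nil, false_or, PySem.List.mem_pyRange_one]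
  have hN := PySem.Str.len_eq phrase
  constructor
  · rintro ⟨i, ⟨hi0, hin⟩, j, ⟨hj1, hjn⟩, k, ⟨hk0, hkm⟩, l, ⟨hl1, hlm⟩, -, rfl⟩
    rw [hN] at hin hjn
    have hj0 : (0:Int) ≤ j + 1 := by omega
    have hm := pv_len_slice phrase i (j + 1) hi0 hj0
    rw [hm] at hkm hlm
    have hmin : min ((j+1).toNat - i.toNat) (phrase.toList.length - i.toNat)
        = (j+1).toNat - i.toNat := by omega
    rw [hmin] at hkm hlm
    have hl0 : (0:Int) ≤ l + 1 := by omega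
    refine ⟨i.toNat + k.toNat, (l+1).toNat - k.toNat, by omega, by omega, ?_⟩
    rw [pv_slice_repr phrase i (j+1) hi0 hj0,
      pv_slice_repr _ k (l+1) hk0 hl0, String.toList_ofList]
    congr 1
    rw [List.drop_take, List.drop_drop, List.take_take]
    congr 1
    omega
  · rintro ⟨p, q, hpq, hq2, rfl⟩
    refine ⟨(p : Int), ⟨by positivity, by omega⟩, (p : Int) + (q : Int) - 1,
      ⟨by omega, by omega⟩, 0, ?_⟩
    have hb : ((p:Int) + (q:Int) - 1) + 1 = ((p + q : Nat) : Int) := by push_cast; ring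
    rw [hb]
    have hm := pv_len_slice phrase (p:Int) ((p+q : Nat) : Int) (by positivity) (by positivity)
    have hmv : PySem.Str.len (PySem.Str.slice phrase (some (p:Int)) (some ((p+q : Nat):Int)))
        = (q : Int) := by rw [hm]; simp only [Int.toNat_natCast]; omega
    refine ⟨⟨le_refl 0, by omega⟩, (q:Int) - 1, ⟨by omega, by omega⟩, ?_, ?_⟩
    · have hc : (0:Int) ≤ (q:Int) - 1 + 1 := by omega
      rw [pv_len_slice _ 0 ((q:Int) - 1 + 1) (le_refl 0) hc, pv_slice_repr phrase _ _ (by positivity) (by positivity), String.toList_ofList]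
      simp only [List.length_take, List.length_drop]
      simp only [Int.toNat_natCast]
      omega
    · rw [pv_slice_repr phrase _ _ (by positivity) (by positivity),
        pv_slice_repr _ 0 ((q:Int) - 1 + 1) (le_refl 0) (by omega), String.toList_ofList]
      rw [List.drop_take, List.drop_drop, List.take_take]
      congr 1
      simp only [Int.toNat_natCast]
      have e1 : min ((((q:Int) - 1 + 1).toNat - Int.toNat 0)) (p + q - p - Int.toNat 0) = q := by
        omega
      have e2 : p + Int.toNat 0 = p := by omega
      rw [e1, e2]

theorem pv_memB (phrase a : String) :
    a ∈ (let n : Int := PySem.Str.len phrase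
      (PySem.List.pyRange 0 n 1).foldl (fun acc i =>
        (PySem.List.pyRange (i + 2) (n + 1) 1).foldl (fun acc j =>
          PySem.Set.add acc (PySem.Str.slice phrase (some i) (some j))) acc)
        (PySem.Set.empty : PySem.Set String)) ↔ pvSub phrase a := by
  have h2 : forall (i : Int) (s : List String) (a' : String),
      a' ∈ (PySem.List.pyRange (i + 2) (PySem.Str.len phrase + 1) 1).foldl (fun acc j =>
          PySem.Set.add acc (PySem.Str.slice phrase (some i) (some j))) s ↔
        a' ∈ s ∨ ∃ j ∈ PySem.List.pyRange (i + 2) (PySem.Str.len phrase + 1) 1,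
          a' = PySem.Str.slice phrase (some i) (some j) :=
    fun i => pv_mem_foldl_iff _ _ _ (fun s x a' => PySem.Set.mem_add s _ a')
  have h1 : a ∈ (PySem.List.pyRange 0 (PySem.Str.len phrase) 1).foldl (fun acc i =>
        (PySem.List.pyRange (i + 2) (PySem.Str.len phrase + 1) 1).foldl (fun acc j =>
          PySem.Set.add acc (PySem.Str.slice phrase (some i) (some j))) acc)
        (PySem.Set.empty : PySem.Set String) ↔
      a ∈ (PySem.Set.empty : PySem.Set String) ∨
        ∃ i ∈ PySem.List.pyRange 0 (PySem.Str.len phrase) 1,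
        ∃ j ∈ PySem.List.pyRange (i + 2) (PySem.Str.len phrase + 1) 1,
          a = PySem.Str.slice phrase (some i) (some j) :=
    pv_mem_foldl_iff _ _ _ (fun s i a' => h2 i s a') (PySem.Set.empty : PySem.Set String) a
  refine h1.trans ?_
  clear h1 h2
  simp only [PySem.Set.empty, List.not_mem_nil, false_or, PySem.List.mem_pyRange_one]
  have hN := PySem.Str.len_eq phrase
  constructor
  · rintro ⟨i, ⟨hi0, hin⟩, j, ⟨hj2, hjn⟩, rfl⟩
    rw [hN] at hin hjn
    have hj0 : (0:Int) ≤ j := by omega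
    refine ⟨i.toNat, j.toNat - i.toNat, by omega, by omega, ?_⟩
    rw [pv_slice_repr phrase i j hi0 hj0]
  · rintro ⟨p, q, hpq, hq2, rfl⟩
    refine ⟨(p : Int), ⟨by positivity, by omega⟩, ((p + q : Nat) : Int), ⟨by push_cast; omega, by omega⟩, ?_⟩
    rw [pv_slice_repr phrase _ _ (by positivity) (by positivity)]
    congr 2
    omega

theorem pv_nodupA (phrase : String) :
    ((PySem.List.pyRange 0 (PySem.Str.len phrase) 1).foldl (fun acc i =>
        (PySem.List.pyRange (i + 1) (PySem.Str.len phrase) 1).foldl (fun acc j =>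
          let substring := PySem.Str.slice phrase (some i) (some (j + 1))
          (PySem.List.pyRange 0 (PySem.Str.len substring) 1).foldl (fun acc k =>
            (PySem.List.pyRange (k + 1) (PySem.Str.len substring) 1).foldl (fun acc l =>
              let nested := PySem.Str.slice substring (some k) (some (l + 1))
              if PySem.Str.len nested > 0 then PySem.Set.add acc nested else acc)
            acc) acc) acc) (PySem.Set.empty : PySem.Set String)).Nodup := by
  refine pv_nodup_foldl _ _ ?_ _ List.nodup_nil
  intro s i hs
  refine pv_nodup_foldl _ _ ?_ _ hs
  intro s j hs
  refine pv_nodup_foldl _ _ ?_ _ hs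
  intro s k hs
  refine pv_nodup_foldl _ _ ?_ _ hs
  intro s l hs
  dsimp only
  split
  · exact PySem.Set.nodup_add _ _ hs
  · exact hs

theorem pv_nodupB (phrase : String) :
    ((PySem.List.pyRange 0 (PySem.Str.len phrase) 1).foldl (fun acc i =>
        (PySem.List.pyRange (i + 2) (PySem.Str.len phrase + 1) 1).foldl (fun acc j =>
          PySem.Set.add acc (PySem.Str.slice phrase (some i) (some j))) acc)
        (PySem.Set.empty : PySem.Set String)).Nodup := by
  refine pv_nodup_foldl _ _ ?_ _ List.nodup_nil
  intro s i hs
  refine pv_nodup_foldl _ _ ?_ _ hs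
  intro s j hs
  exact PySem.Set.nodup_add _ _ hs

-- ===== VERDICT (by name: the statement is the Claim_ definition above) =====
theorem find_nested_substrings_spec : Claim_equal_find_nested_substrings := by
  intro phrase _
  unfold Spec_find_nested_substrings find_nested_substrings find_nested_substrings_alt
  apply PySem.List.sorted_eq_sorted_of_perm _ _ _ (fun a b h => h)
  exact (List.perm_ext_iff_of_nodup (pv_nodupA phrase) (pv_nodupB phrase)).2
    (fun x => (pv_memA phrase x).trans (pv_memB phrase x).symm)
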